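-- pv_equiv track=rewrite | github.com/wyk18703232953/myResearch | codeComplex/data/filteredData/python/np/python_np_0356.py | solve_single_case
-- ===== SOURCE A (Python) =====
-- inf = float('inf')
--
-- def solve_single_case(grid):
--     n = len(grid)
--     m = len(grid[0]) if n > 0 else 0
--
--     # collect (value, column) for all cells
--     valCol = []
--     for i in range(n):
--         for j in range(m):
--             valCol.append((grid[i][j], j))
--     valCol.sort(reverse=True)
--
--     # choose top n columns by value
--     topCols = set()
--     for val, col in valCol:
--         topCols.add(col)
--         if len(topCols) == n:
--             break
--
--     m2 = len(topCols)
--     # construct reduced grid with only selected columns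
--     grid2 = [[-1 for _ in range(m2)] for __ in range(n)]
--     topColsList = list(topCols)
--     for j in range(m2):
--         col = topColsList[j]
--         for i in range(n):
--             grid2[i][j] = grid[i][col]
--
--     # brute force over all cyclic shifts for each of the m2 columns
--     ans = -inf
--     total_states = n ** m2
--     for mask in range(total_states):
--         temp_mask = mask
--         grid3 = [[-1 for _ in range(m2)] for __ in range(n)]
--         for col in range(m2):
--             shift = temp_mask % n
--             temp_mask //= n
--             for row in range(n):
--                 grid3[row][col] = grid2[(shift + row) % n][col]
--         tempAns = 0
--         for row in range(n):
--             maxx = -inf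
--             for col in range(m2):
--                 if grid3[row][col] > maxx:
--                     maxx = grid3[row][col]
--             tempAns += maxx
--         if tempAns > ans:
--             ans = tempAns
--
--     return ans
-- ===== SOURCE B (Python) =====
-- def solve_single_case(grid):
--     n = len(grid)
--     if n == 0:
--         return 0
--     m = len(grid[0])
--     # keep the first n distinct columns of the cells sorted by (value, column) descending
--     cells = sorted(((grid[i][j], j) for i in range(n) for j in range(m)), reverse=True)
--     kept = list(dict.fromkeys(j for _, j in cells))[:n]
--     cols = [[grid[i][j] for i in range(n)] for j in kept]
--     first, rest = cols[0], cols[1:]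
--
--     # depth-first over one cyclic shift per column, carrying the running row maxima
--     def go(cs, rowmax):
--         if not cs:
--             return sum(rowmax)
--         c, tail = cs[0], cs[1:]
--         return max(go(tail, [max(rowmax[r], c[(s + r) % n]) for r in range(n)])
--                    for s in range(n))
--
--     return max(go(rest, [first[(s + r) % n] for r in range(n)]) for s in range(n))
-- ===== Notes on version B (the rewrite author's own statement) =====
-- stated objective: alternative
-- what changed: Replaces the flat enumeration of all n^m2 shift masks (decoding each mask and rebuilding a shifted matrix plus fresh row scans per mask) by a depth-first recursion over the selected columns that carries a running row-maxima vector, so common shift prefixes are shared and no matrix is materialised; column selection becomes an ordered-dedup one-liner instead of a set-and-break loop plus an explicit reduced-grid build.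
-- outside the precondition, e.g. on solve_single_case([[]]): A returns -inf, B raises IndexError
import Mathlib
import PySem

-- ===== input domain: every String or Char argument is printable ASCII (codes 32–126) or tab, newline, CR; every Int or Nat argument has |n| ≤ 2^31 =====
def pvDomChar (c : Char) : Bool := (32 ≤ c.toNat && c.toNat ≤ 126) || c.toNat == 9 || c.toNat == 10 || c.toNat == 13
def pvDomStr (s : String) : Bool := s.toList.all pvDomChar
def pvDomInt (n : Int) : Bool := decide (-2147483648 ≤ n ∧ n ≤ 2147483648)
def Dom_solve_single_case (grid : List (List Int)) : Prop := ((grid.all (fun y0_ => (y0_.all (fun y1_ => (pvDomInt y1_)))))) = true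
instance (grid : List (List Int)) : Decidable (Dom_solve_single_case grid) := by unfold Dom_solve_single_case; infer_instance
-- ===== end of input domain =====

-- B replaces A's flat enumeration of all n^m2 shift masks (mask decode + matrix rebuild per mask)
-- by a depth-first recursion over the kept columns carrying a running row-maxima vector,
-- sharing shift prefixes; column selection becomes an ordered dedup.


-- ===== PORT A =====
-- running max with initial value -inf ('if v > maxx: maxx = v')
def aStep (a : Option Int) (v : Int) : Option Int :=
  if (match a with | none => true | some b => decide (b < v)) then some v else a

-- 'for val, col in valCol: topCols.add(col); if len(topCols) == n: break'
def buildTop (n : Nat) : List (Int × Nat) → PySem.Set Nat → PySem.Set Nat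
  | [], s => s
  | vc :: rest, s =>
    let s' := PySem.Set.add s vc.2
    if s'.length = n then s' else buildTop n rest s'

-- Loop counters/indices are Python ints that are provably ≥ 0: ported as Nat (exact).
-- grid[i][j] reads are ported with getD; in range under Pre_ (the default is unreachable there).
def solve_single_case (grid : List (List Int)) : Int :=
  let n := grid.length
  let m := if 0 < n then (grid.headD []).length else 0
  let valCol : List (Int × Nat) :=
    (List.range n).foldl (fun acc i =>
      (List.range m).foldl (fun acc2 j => acc2 ++ [((grid.getD i []).getD j 0, j)]) acc) []
  let valColS := PySem.List.sorted2 valCol (fun p => p.1) (fun p => p.2) true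
  let topColsList : List Nat := buildTop n valColS PySem.Set.empty
  let m2 := topColsList.length
  let grid2 : List (List Int) :=
    (List.range m2).foldl (fun g j =>
      let col := topColsList.getD j 0
      (List.range n).foldl (fun g2 i =>
        g2.set i ((g2.getD i []).set j ((grid.getD i []).getD col 0))) g)
      (List.replicate n (List.replicate m2 (-1)))
  let ans : Option Int :=
    (List.range (n ^ m2)).foldl (fun ans mask =>
      let st :=
        (List.range m2).foldl (fun (st : Nat × List (List Int)) col =>
          let shift := st.1 % n
          let tm := st.1 / n
          let g3 := (List.range n).foldl (fun g3 row =>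
            g3.set row ((g3.getD row []).set col ((grid2.getD ((shift + row) % n) []).getD col 0))) st.2
          (tm, g3)) (mask, List.replicate n (List.replicate m2 (-1)))
      let grid3 := st.2
      let tempAns := (List.range n).foldl (fun tempAns row =>
        let maxx := (List.range m2).foldl (fun maxx col =>
          aStep maxx ((grid3.getD row []).getD col 0)) (none : Option Int)
        -- maxx = none only when m2 = 0 (Python then adds float -inf; excluded by Pre_)
        tempAns + maxx.getD 0) (0 : Int)
      aStep ans tempAns) none
  -- the mask loop runs n ^ m2 ≥ 1 times, so ans is always set
  ans.getD 0

-- ===== PORT B =====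
-- depth-first over one cyclic shift per remaining column, carrying the running row maxima;
-- Python's max(...) over a nonempty generator of ints is ported as .max?.getD 0 (n ≥ 1 under Pre_)
def bGo (n : Nat) : List (List Int) → List Int → Int
  | [], rowmax => rowmax.sum
  | c :: tail, rowmax =>
      (((List.range n).map (fun s =>
          bGo n tail ((List.range n).map (fun r =>
            max (rowmax.getD r 0) (c.getD ((s + r) % n) 0))))).max?).getD 0

def solve_single_case_alt (grid : List (List Int)) : Int :=
  let n := grid.length
  if n = 0 then 0 else
  let m := (grid.headD []).length
  let cells := PySem.List.sorted2
      ((List.range n).flatMap (fun i => (List.range m).map (fun j => ((grid.getD i []).getD j 0, j))))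
      (fun p => p.1) (fun p => p.2) true
  let kept := (PySem.List.dedup (cells.map (fun p => p.2))).take n
  let cols := kept.map (fun j => (List.range n).map (fun i => (grid.getD i []).getD j 0))
  match cols with
  | [] => 0   -- unreachable under Pre_: Python raises IndexError on cols[0] when m = 0
  | first :: rest =>
    (((List.range n).map (fun s =>
        bGo n rest ((List.range n).map (fun r => first.getD ((s + r) % n) 0)))).max?).getD 0

-- ===== PRECONDITION & SPEC =====
-- Pre_ excludes inputs where Python A raises (a row shorter than row 0: IndexError) and the
-- degenerate nonempty grid with empty rows, on which A returns float('-inf') — not an int.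
def Pre_solve_single_case (grid : List (List Int)) : Prop :=
  grid = [] ∨ (0 < (grid.headD []).length ∧ ∀ row ∈ grid, (grid.headD []).length ≤ row.length)
instance (grid : List (List Int)) : Decidable (Pre_solve_single_case grid) := by
  unfold Pre_solve_single_case; infer_instance
def pvWitness_solve_single_case : List (List Int) := [[1, 2], [3, 4]]

def Spec_solve_single_case (grid : List (List Int)) (out : Int) : Prop := out = solve_single_case_alt grid
instance (grid : List (List Int)) (out : Int) : Decidable (Spec_solve_single_case grid out) := by unfold Spec_solve_single_case; infer_instance

-- ===== CLAIM (what is proved, stated in full; the proofs are below) =====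
def Claim_equal_solve_single_case : Prop := ∀ (grid : List (List Int)), Dom_solve_single_case grid → Pre_solve_single_case grid → Spec_solve_single_case grid (solve_single_case grid)

-- ===== LEMMAS AND PROOFS =====

-- ---- generic max helpers (Int lists, Mathlib List.max?) ----
theorem pvMax?_cons (v : Int) (vs : List Int) : (v :: vs).max? = some (vs.foldl max v) := rfl

theorem pvLe_maxD {l : List Int} {x : Int} (h : x ∈ l) : x ≤ l.max?.getD 0 := by
  cases l with
  | nil => exact absurd h List.not_mem_nil
  | cons v vs =>
    simp only [pvMax?_cons, Option.getD_some]
    rcases List.mem_cons.mp h with rfl | hv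
    · exact (PySem.List.le_foldl_max vs x).1
    · exact (PySem.List.le_foldl_max vs v).2 _ hv

theorem pvMaxD_eq {l : List Int} {g : Int} (hub : ∀ x ∈ l, x ≤ g) (hmem : g ∈ l) :
    l.max?.getD 0 = g := by
  cases l with
  | nil => exact absurd hmem List.not_mem_nil
  | cons v vs =>
    refine le_antisymm ?_ (pvLe_maxD hmem)
    simp only [pvMax?_cons, Option.getD_some]
    rcases PySem.List.foldl_max_mem vs v with h | h
    · rw [h]; exact hub v (List.mem_cons_self)
    · exact hub _ (List.mem_cons_of_mem _ h)

-- ---- abstract objects both ports reduce to ----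
def cellv (grid : List (List Int)) (i j : Nat) : Int := (grid.getD i []).getD j 0

def rotv (n : Nat) (c : List Int) (s r : Nat) : Int := c.getD ((s + r) % n) 0

def Ssum (n : Nat) (rm : Nat → Int) : Int := ((List.range n).map rm).sum

-- row maxima accumulated along a column list, shifts taken from the base-n digits of mask
def accF (n : Nat) : List (List Int) → Nat → (Nat → Int) → (Nat → Int)
  | [], _, rm => rm
  | c :: cs, mask, rm => accF n cs (mask / n) (fun r => max (rm r) (rotv n c (mask % n) r))

-- the DFS value: max over one cyclic shift per column of the sum of final row maxima
def Gm (n : Nat) : List (List Int) → (Nat → Int) → Int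
  | [], rm => Ssum n rm
  | c :: cs, rm =>
    (((List.range n).map (fun s => Gm n cs (fun r => max (rm r) (rotv n c s r)))).max?).getD 0

theorem accF_eq_foldl (n : Nat) : ∀ (cs : List (List Int)) (mask : Nat) (rm : Nat → Int) (r : Nat),
    accF n cs mask rm r =
      (List.range cs.length).foldl
        (fun a k => max a (rotv n (cs.getD k []) ((mask / n ^ k) % n) r)) (rm r) := by
  intro cs
  induction cs with
  | nil => intro mask rm r; simp [accF]
  | cons c cs ih =>
    intro mask rm r
    simp only [accF, List.length_cons]
    rw [ih]
    rw [List.range_succ_eq_map, List.foldl_cons, List.foldl_map]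
    have h0 : max (rm r) (rotv n ((c :: cs).getD 0 []) ((mask / n ^ 0) % n) r)
        = max (rm r) (rotv n c (mask % n) r) := by simp
    rw [h0]
    have hf : (fun (a : Int) (k : Nat) =>
          max a (rotv n ((c :: cs).getD k.succ []) ((mask / n ^ k.succ) % n) r))
        = (fun (a : Int) (k : Nat) =>
          max a (rotv n (cs.getD k []) ((mask / n / n ^ k) % n) r)) := by
      funext a k
      rw [List.getD_cons_succ]
      rw [Nat.pow_succ', Nat.div_div_eq_div_mul]
    rw [hf]

theorem accF_le_Gm {n : Nat} (hn : 0 < n) : ∀ (cs : List (List Int)) (rm : Nat → Int) (mask : Nat),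
    Ssum n (accF n cs mask rm) ≤ Gm n cs rm := by
  intro cs
  induction cs with
  | nil => intro rm mask; simp [accF, Gm]
  | cons c cs ih =>
    intro rm mask
    simp only [accF, Gm]
    refine le_trans (ih _ (mask / n)) (pvLe_maxD ?_)
    exact List.mem_map.mpr ⟨mask % n, List.mem_range.mpr (Nat.mod_lt mask hn), rfl⟩

theorem accF_ex {n : Nat} (hn : 0 < n) : ∀ (cs : List (List Int)) (rm : Nat → Int),
    ∃ mask, mask < n ^ cs.length ∧ Ssum n (accF n cs mask rm) = Gm n cs rm := by
  intro cs
  induction cs with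
  | nil => intro rm; exact ⟨0, by simp, by simp [accF, Gm]⟩
  | cons c cs ih =>
    intro rm
    set L := (List.range n).map (fun s => Gm n cs (fun r => max (rm r) (rotv n c s r))) with hL
    have hLne : L ≠ [] := by
      simp [hL, List.map_eq_nil_iff, List.range_eq_nil]; omega
    obtain ⟨mx, hmx⟩ : ∃ mx, L.max? = some mx := by
      cases h : L.max? with
      | none => exact absurd (List.max?_eq_none_iff.mp h) hLne
      | some m => exact ⟨m, rfl⟩
    obtain ⟨s, hs, hsm⟩ := List.mem_map.mp (List.max?_mem hmx)
    have hs' : s < n := List.mem_range.mp hs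
    obtain ⟨mask', hm1, hm2⟩ := ih (fun r => max (rm r) (rotv n c s r))
    refine ⟨s + n * mask', ?_, ?_⟩
    · have h1 : n * mask' + n ≤ n * n ^ cs.length := by
        have h := Nat.mul_le_mul_left n (Nat.succ_le_of_lt hm1)
        rwa [Nat.mul_succ] at h
      simp only [List.length_cons, Nat.pow_succ']
      omega
    · have hmod : (s + n * mask') % n = s := by
        rw [Nat.add_mul_mod_self_left, Nat.mod_eq_of_lt hs']
      have hdiv : (s + n * mask') / n = mask' := by
        rw [Nat.add_mul_div_left _ _ hn, Nat.div_eq_of_lt hs']; omega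
      simp only [accF, Gm, hmod, hdiv, ← hL, hmx, Option.getD_some]
      rw [hm2, hsm]

-- ---- B-side bridge ----
theorem bGo_eq_Gm {n : Nat} : ∀ (cs : List (List Int)) (f : Nat → Int),
    bGo n cs ((List.range n).map f) = Gm n cs f := by
  intro cs
  induction cs with
  | nil => intro f; rfl
  | cons c tail ih =>
    intro f
    simp only [bGo, Gm]
    refine congrArg (fun l => (List.max? l).getD 0) (List.map_congr_left ?_)
    intro s _
    have hrm : (List.range n).map (fun r =>
          max (((List.range n).map f).getD r 0) (c.getD ((s + r) % n) 0))
        = (List.range n).map (fun r => max (f r) (rotv n c s r)) := by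
      refine List.map_congr_left ?_
      intro r hr
      rw [PySem.List.getD_map_range f n r 0 (List.mem_range.mp hr)]
      rfl
    rw [hrm, ih]

-- ---- A-side: valCol, buildTop ----
theorem pvUpdate_prefix {s : PySem.Set Nat} : ∀ (xs : List Nat), ∃ t, PySem.Set.update s xs = s ++ t := by
  intro xs
  induction xs generalizing s with
  | nil => exact ⟨[], (List.append_nil s).symm⟩
  | cons x xs ih =>
    show ∃ t, PySem.Set.update (PySem.Set.add s x) xs = s ++ t
    by_cases h : s.contains x
    · have hadd : PySem.Set.add s x = s := by unfold PySem.Set.add; rw [if_pos h]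
      rw [hadd]; exact ih
    · have hadd : PySem.Set.add s x = s ++ [x] := by unfold PySem.Set.add; rw [if_neg h]
      obtain ⟨t, ht⟩ := ih (s := s ++ [x])
      rw [hadd, ht]
      exact ⟨x :: t, by simp⟩

theorem buildTop_eq (n : Nat) : ∀ (l : List (Int × Nat)) (s : PySem.Set Nat), s.length < n →
    buildTop n l s = (PySem.Set.update s (l.map (fun p => p.2))).take n := by
  intro l
  induction l with
  | nil =>
    intro s h
    simp only [buildTop, List.map_nil]
    exact (List.take_of_length_le (le_of_lt h)).symm
  | cons vc rest ih =>
    intro s h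
    simp only [buildTop, List.map_cons]
    have hupd : PySem.Set.update s (vc.2 :: rest.map (fun p => p.2))
        = PySem.Set.update (PySem.Set.add s vc.2) (rest.map (fun p => p.2)) := rfl
    rw [hupd]
    split
    · next heq =>
      obtain ⟨t, ht⟩ := pvUpdate_prefix (s := PySem.Set.add s vc.2) (rest.map (fun p => p.2))
      rw [ht]
      rw [List.take_append, ← heq, List.take_of_length_le (le_refl _),
        Nat.sub_self, List.take_zero, List.append_nil]
    · next hne =>
      have hlen : (PySem.Set.add s vc.2).length < n := by
        have : (PySem.Set.add s vc.2).length ≤ s.length + 1 := by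
          unfold PySem.Set.add; split <;> simp
        omega
      exact ih _ hlen

-- ---- A-side: matrix builds ----
def colWrite (n : Nat) (g : List (List Int)) (j : Nat) (f : Nat → Int) : List (List Int) :=
  (List.range n).foldl (fun g2 i => g2.set i ((g2.getD i []).set j (f i))) g

theorem pvMap_range_getD (g : List (List Int)) :
    (List.range g.length).map (fun i => g.getD i []) = g := by
  refine List.ext_getElem (by simp) ?_
  intro i h1 h2
  simp only [List.getElem_map, List.getElem_range]
  rw [List.getD_eq_getElem?_getD, List.getElem?_eq_getElem (by simpa using h1), Option.getD_some]

theorem colWrite_eq (n : Nat) (g : List (List Int)) (j : Nat) (f : Nat → Int) (hg : g.length = n) :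
    colWrite n g j f = (List.range n).map (fun i => (g.getD i []).set j (f i)) := by
  subst hg
  unfold colWrite
  suffices haux : ∀ k, k ≤ g.length → (List.range k).foldl
      (fun g2 i => g2.set i ((g2.getD i []).set j (f i))) g
      = (List.range g.length).map
          (fun i => if i < k then (g.getD i []).set j (f i) else g.getD i []) by
    rw [haux g.length (le_refl _)]
    refine List.map_congr_left ?_
    intro i hi
    rw [if_pos (List.mem_range.mp hi)]
  intro k hk
  induction k with
  | zero =>
    simp only [List.range_zero, List.foldl_nil]
    conv_lhs => rw [← pvMap_range_getD g]
    refine List.map_congr_left ?_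
    intro i _; rw [if_neg (by omega)]
  | succ k ihk =>
    have hk' : k ≤ g.length := by omega
    rw [List.range_succ, List.foldl_append, List.foldl_cons, List.foldl_nil, ihk hk']
    have hgd : ((List.range g.length).map
        (fun i => if i < k then (g.getD i []).set j (f i) else g.getD i [])).getD k []
        = g.getD k [] := by
      rw [PySem.List.getD_map_range _ _ _ _ (by omega)]
      rw [if_neg (by omega)]
    rw [hgd]
    refine List.ext_getElem (by simp) ?_
    intro i h1 h2
    have hi : i < g.length := by simpa using h2
    rw [List.getElem_set]
    simp only [List.getElem_map, List.getElem_range]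
    by_cases hik : k = i
    · subst hik; rw [if_pos rfl, if_pos (by omega)]
    · rw [if_neg hik]
      by_cases hlt : i < k
      · rw [if_pos hlt, if_pos (by omega)]
      · rw [if_neg hlt, if_neg (by omega)]

theorem buildMat (n m2 : Nat) (f : Nat → Nat → Int) :
    (List.range m2).foldl (fun g j => colWrite n g j (fun i => f i j))
        (List.replicate n (List.replicate m2 (-1)))
      = (List.range n).map (fun i => (List.range m2).map (fun j => f i j)) := by
  suffices haux : ∀ k, k ≤ m2 → (List.range k).foldl
      (fun g j => colWrite n g j (fun i => f i j)) (List.replicate n (List.replicate m2 (-1)))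
      = (List.range n).map (fun i => (List.range m2).map (fun j => if j < k then f i j else -1)) by
    rw [haux m2 (le_refl _)]
    refine List.map_congr_left ?_
    intro i _
    refine List.map_congr_left ?_
    intro j hj
    rw [if_pos (List.mem_range.mp hj)]
  intro k hk
  induction k with
  | zero =>
    simp only [List.range_zero, List.foldl_nil]
    refine List.ext_getElem (by simp) ?_
    intro i h1 h2
    simp only [List.getElem_replicate, List.getElem_map, List.getElem_range]
    refine List.ext_getElem (by simp) ?_
    intro j h3 h4
    simp
  | succ k ihk =>
    have hk' : k ≤ m2 := by omega
    rw [List.range_succ, List.foldl_append, List.foldl_cons, List.foldl_nil, ihk hk']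
    rw [colWrite_eq _ _ _ _ (by simp)]
    refine List.map_congr_left ?_
    intro i hi
    rw [PySem.List.getD_map_range _ _ _ _ (List.mem_range.mp hi)]
    refine List.ext_getElem (by simp) ?_
    intro j h1 h2
    have hj : j < m2 := by simpa using h2
    rw [List.getElem_set]
    simp only [List.getElem_map, List.getElem_range]
    by_cases hjk : k = j
    · subst hjk; rw [if_pos rfl, if_pos (by omega)]
    · rw [if_neg hjk]
      by_cases hlt : j < k
      · rw [if_pos hlt, if_pos (by omega)]
      · rw [if_neg hlt, if_neg (by omega)]

-- the mask-decoding column loop of A, with the (temp_mask, grid3) pair state flattened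
def shiftFold (n : Nat) (grid2 : List (List Int)) : List Nat → Nat → List (List Int) → List (List Int)
  | [], _, g => g
  | j :: rest, t, g =>
    shiftFold n grid2 rest (t / n)
      (colWrite n g j (fun row => (grid2.getD ((t % n + row) % n) []).getD j 0))

theorem shiftFold_eq_digits (n : Nat) (grid2 : List (List Int)) :
    ∀ (k a : Nat) (t : Nat) (g : List (List Int)),
      shiftFold n grid2 (List.range' a k) t g =
        (List.range' a k).foldl
          (fun g j => colWrite n g j
            (fun row => (grid2.getD (((t / n ^ (j - a)) % n + row) % n) []).getD j 0)) g := by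
  intro k
  induction k with
  | zero => intro a t g; simp [shiftFold]
  | succ k ih =>
    intro a t g
    rw [List.range'_succ]
    simp only [shiftFold, List.foldl_cons]
    have h0 : (fun row => (grid2.getD (((t / n ^ (a - a)) % n + row) % n) []).getD a 0)
        = (fun row => (grid2.getD ((t % n + row) % n) []).getD a 0) := by
      funext row; rw [Nat.sub_self, Nat.pow_zero, Nat.div_one]
    rw [h0, ih (a + 1) (t / n)]
    refine PySem.List.foldl_congr_mem _ _ _ _ ?_
    intro g' j hj
    have hj' : a + 1 ≤ j := (List.mem_range'_1.mp hj).1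
    have hde : t / n / n ^ (j - (a + 1)) = t / n ^ (j - a) := by
      have hexp : j - (a + 1) + 1 = j - a := by omega
      rw [Nat.div_div_eq_div_mul, ← Nat.pow_succ', Nat.succ_eq_add_one, hexp]
    rw [hde]

-- ---- A-side: the per-row running max ----
theorem aStep_some (b : Int) : ∀ (vs : List Int), vs.foldl aStep (some b) = some (vs.foldl max b) := by
  intro vs
  induction vs generalizing b with
  | nil => rfl
  | cons v vs ih =>
    simp only [List.foldl_cons]
    have h1 : aStep (some b) v = some (max b v) := by
      by_cases h : b < v <;> simp [aStep, h, max_def] <;> omega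
    rw [h1, ih]

theorem pvPairFold (n : Nat) (grid2 : List (List Int)) : ∀ (js : List Nat) (t : Nat) (g : List (List Int)),
    (js.foldl (fun (st : Nat × List (List Int)) col =>
        (st.1 / n, colWrite n st.2 col
          (fun row => (grid2.getD ((st.1 % n + row) % n) []).getD col 0))) (t, g)).2
      = shiftFold n grid2 js t g := by
  intro js
  induction js with
  | nil => intro t g; rfl
  | cons j rest ih => intro t g; exact ih _ _

theorem pvGetD_map {α β : Type} (f : α → β) (l : List α) (k : Nat) (hk : k < l.length) (d : β) (d' : α) :
    (l.map f).getD k d = f (l.getD k d') := by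
  rw [List.getD_eq_getElem?_getD, List.getD_eq_getElem?_getD, List.getElem?_map,
    List.getElem?_eq_getElem hk]
  simp

theorem pvFoldl_aStep (l : List Int) (hl : l ≠ []) : (l.foldl aStep none).getD 0 = l.max?.getD 0 := by
  cases l with
  | nil => exact absurd rfl hl
  | cons v vs =>
    rw [List.foldl_cons]
    have h0 : aStep none v = some v := rfl
    rw [h0, aStep_some, pvMax?_cons]

theorem shiftFold_range (n : Nat) (grid2 : List (List Int)) (m2 t : Nat) (g : List (List Int)) :
    shiftFold n grid2 (List.range m2) t g
      = (List.range m2).foldl (fun g j => colWrite n g j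
          (fun row => (grid2.getD (((t / n ^ j) % n + row) % n) []).getD j 0)) g := by
  rw [List.range_eq_range', shiftFold_eq_digits]
  have hf : (fun (g : List (List Int)) (j : Nat) => colWrite n g j
        (fun row => (grid2.getD (((t / n ^ (j - 0)) % n + row) % n) []).getD j 0))
      = (fun g j => colWrite n g j
          (fun row => (grid2.getD (((t / n ^ j) % n + row) % n) []).getD j 0)) := by
    funext g j
    rw [Nat.sub_zero]
  rw [hf, ← List.range_eq_range']

theorem pvRowSum (grid : List (List Int)) (kept : List Nat) (k0 : Nat) (kr : List Nat)
    (hn : 0 < grid.length) (hk : kept = k0 :: kr) (t : Nat) :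
    (List.range grid.length).foldl (fun tempAns row =>
        tempAns + ((List.range kept.length).foldl (fun maxx col =>
            aStep maxx ((((List.range grid.length).map (fun i => (List.range kept.length).map
                (fun j => (((List.range grid.length).map (fun i => (List.range kept.length).map
                    (fun j => (grid.getD i []).getD (kept.getD j 0) 0))).getD
                  (((t / grid.length ^ j) % grid.length + i) % grid.length) []).getD j 0))).getD
              row []).getD col 0)) none).getD 0) 0
      = Ssum grid.length (accF grid.length
          (kr.map (fun jj => (List.range grid.length).map (fun i => (grid.getD i []).getD jj 0)))
          (t / grid.length)
          (fun r => rotv grid.length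
            ((List.range grid.length).map (fun i => (grid.getD i []).getD k0 0))
            (t % grid.length) r)) := by
  subst hk
  have hw : ∀ row col, row < grid.length → col < (k0 :: kr).length →
      (((List.range grid.length).map (fun i => (List.range (k0 :: kr).length).map
          (fun j => (((List.range grid.length).map (fun i => (List.range (k0 :: kr).length).map
              (fun j => (grid.getD i []).getD ((k0 :: kr).getD j 0) 0))).getD
            (((t / grid.length ^ j) % grid.length + i) % grid.length) []).getD j 0))).getD
        row []).getD col 0
      = (grid.getD (((t / grid.length ^ col) % grid.length + row) % grid.length) []).getD
          ((k0 :: kr).getD col 0) 0 := by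
    intro row col hrow hcol
    rw [PySem.List.getD_map_range _ _ _ _ hrow]
    rw [PySem.List.getD_map_range _ _ _ _ hcol]
    rw [PySem.List.getD_map_range _ _ _ _ (Nat.mod_lt _ hn)]
    rw [PySem.List.getD_map_range _ _ _ _ hcol]
  have hrowval : ∀ row, row < grid.length →
      ((List.range (k0 :: kr).length).foldl (fun maxx col =>
          aStep maxx ((((List.range grid.length).map (fun i => (List.range (k0 :: kr).length).map
              (fun j => (((List.range grid.length).map (fun i => (List.range (k0 :: kr).length).map
                  (fun j => (grid.getD i []).getD ((k0 :: kr).getD j 0) 0))).getD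
                (((t / grid.length ^ j) % grid.length + i) % grid.length) []).getD j 0))).getD
            row []).getD col 0)) none).getD 0
      = accF grid.length
          (kr.map (fun jj => (List.range grid.length).map (fun i => (grid.getD i []).getD jj 0)))
          (t / grid.length)
          (fun r => rotv grid.length
            ((List.range grid.length).map (fun i => (grid.getD i []).getD k0 0))
            (t % grid.length) r) row := by
    intro row hrow
    have h1 : (List.range (k0 :: kr).length).foldl (fun maxx col =>
          aStep maxx ((((List.range grid.length).map (fun i => (List.range (k0 :: kr).length).map
              (fun j => (((List.range grid.length).map (fun i => (List.range (k0 :: kr).length).map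
                  (fun j => (grid.getD i []).getD ((k0 :: kr).getD j 0) 0))).getD
                (((t / grid.length ^ j) % grid.length + i) % grid.length) []).getD j 0))).getD
            row []).getD col 0)) none
        = (List.range (k0 :: kr).length).foldl (fun maxx col =>
            aStep maxx ((grid.getD (((t / grid.length ^ col) % grid.length + row) % grid.length) []).getD
              ((k0 :: kr).getD col 0) 0)) none := by
      refine PySem.List.foldl_congr_mem _ _ _ _ ?_
      intro acc col hcol
      rw [hw row col hrow (List.mem_range.mp hcol)]
    rw [h1]
    rw [← List.foldl_map
      (f := fun col => (grid.getD (((t / grid.length ^ col) % grid.length + row) % grid.length) []).getD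
        ((k0 :: kr).getD col 0) 0)
      (g := aStep)]
    simp only [List.length_cons]
    rw [List.range_succ_eq_map, List.map_cons, List.map_map, List.foldl_cons]
    have h2 : aStep none ((grid.getD (((t / grid.length ^ 0) % grid.length + row) % grid.length) []).getD
        ((k0 :: kr).getD 0 0) 0) = some ((grid.getD (((t / grid.length ^ 0) % grid.length + row) % grid.length) []).getD
        ((k0 :: kr).getD 0 0) 0) := rfl
    rw [h2, aStep_some, Option.getD_some]
    rw [accF_eq_foldl, List.foldl_map, List.length_map]
    have hseed : (grid.getD (((t / grid.length ^ 0) % grid.length + row) % grid.length) []).getD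
          ((k0 :: kr).getD 0 0) 0
        = rotv grid.length ((List.range grid.length).map (fun i => (grid.getD i []).getD k0 0))
            (t % grid.length) row := by
      unfold rotv
      rw [PySem.List.getD_map_range _ _ _ _ (Nat.mod_lt _ hn)]
      rw [Nat.pow_zero, Nat.div_one]
      rfl
    rw [hseed]
    refine PySem.List.foldl_congr_mem _ _ _ _ ?_
    intro acc k hkmem
    simp only [Function.comp_apply, Nat.succ_eq_add_one]
    have hklt : k < kr.length := List.mem_range.mp hkmem
    have hgd : (kr.map (fun jj => (List.range grid.length).map
          (fun i => (grid.getD i []).getD jj 0))).getD k []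
        = (List.range grid.length).map (fun i => (grid.getD i []).getD (kr.getD k 0) 0) :=
      pvGetD_map _ kr k hklt [] 0
    rw [hgd]
    unfold rotv
    rw [PySem.List.getD_map_range _ _ _ _ (Nat.mod_lt _ hn)]
    have hdiv : t / grid.length ^ (k + 1) = t / grid.length / grid.length ^ k := by
      rw [Nat.div_div_eq_div_mul, ← Nat.pow_succ']
    rw [List.getD_cons_succ, hdiv]
  refine Eq.trans (PySem.List.foldl_congr_mem _ _
    (fun tempAns row => tempAns + accF grid.length
      (kr.map (fun jj => (List.range grid.length).map (fun i => (grid.getD i []).getD jj 0)))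
      (t / grid.length)
      (fun r => rotv grid.length
        ((List.range grid.length).map (fun i => (grid.getD i []).getD k0 0))
        (t % grid.length) r) row) 0 ?_) ?_
  · intro acc row hrow
    rw [hrowval row (List.mem_range.mp hrow)]
  · rw [PySem.List.foldl_add]
    rw [Int.zero_add]
    rfl

theorem pvMain (grid : List (List Int)) (hg : grid ≠ [])
    (hm : 0 < (grid.headD []).length) :
    solve_single_case grid = solve_single_case_alt grid := by
  have hn : 0 < grid.length := List.length_pos_iff.mpr hg
  simp only [solve_single_case, solve_single_case_alt, if_pos hn, if_neg (Nat.pos_iff_ne_zero.mp hn)]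
  simp only [PySem.List.foldl_append_singleton_eq_map, PySem.List.foldl_append_eq_flatMap,
    List.nil_append]
  rw [buildTop_eq grid.length _ PySem.Set.empty (by simpa using hn)]
  have hdd : (PySem.Set.empty.update : List Nat → PySem.Set Nat) = PySem.List.dedup := rfl
  rw [hdd]
  set cells := PySem.List.sorted2
      (List.flatMap (fun x => List.map (fun x_1 => ((grid.getD x []).getD x_1 0, x_1))
        (List.range (grid.headD []).length)) (List.range grid.length))
      (fun p => p.1) (fun p => p.2) true with hcells
  set kept := List.take grid.length (PySem.List.dedup (List.map (fun p => p.2) cells)) with hkept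
  have hgw : (fun (g : List (List Int)) (j : Nat) => List.foldl (fun g2 i =>
        g2.set i ((g2.getD i []).set j ((grid.getD i []).getD (kept.getD j 0) 0))) g
        (List.range grid.length))
      = (fun g j => colWrite grid.length g j (fun i => (grid.getD i []).getD (kept.getD j 0) 0)) := rfl
  rw [hgw, buildMat]
  -- kept is nonempty
  have hVCmem : ((grid.getD 0 []).getD 0 0, (0 : Nat)) ∈ List.flatMap
      (fun x => List.map (fun x_1 => ((grid.getD x []).getD x_1 0, x_1))
        (List.range (grid.headD []).length)) (List.range grid.length) :=
    List.mem_flatMap.mpr ⟨0, List.mem_range.mpr hn,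
      List.mem_map.mpr ⟨0, List.mem_range.mpr hm, rfl⟩⟩
  have hcmem : ((grid.getD 0 []).getD 0 0, (0 : Nat)) ∈ cells := by
    have hp := PySem.List.sorted2_perm
      (List.flatMap (fun x => List.map (fun x_1 => ((grid.getD x []).getD x_1 0, x_1))
        (List.range (grid.headD []).length)) (List.range grid.length))
      (fun p => p.1) (fun p => p.2) true
    rw [← hcells] at hp
    exact hp.mem_iff.mpr hVCmem
  have hdmem : (0 : Nat) ∈ PySem.List.dedup (List.map (fun p => p.2) cells) := by
    rw [PySem.List.dedup_eq_ofList]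
    exact (PySem.Set.mem_ofList _ _).mpr (List.mem_map.mpr ⟨_, hcmem, rfl⟩)
  have hkne : kept ≠ [] := by
    have h1 : 0 < (PySem.List.dedup (List.map (fun p => p.2) cells)).length :=
      List.length_pos_of_mem hdmem
    have h2 : 0 < kept.length := by
      rw [hkept, List.length_take]
      omega
    exact List.ne_nil_of_length_pos h2
  obtain ⟨k0, kr, hk⟩ := List.exists_cons_of_ne_nil hkne
  clear hkept hdmem hcmem hVCmem hdd hgw
  -- rewrite the per-mask state fold into its closed matrix form
  have hcw : (fun (st : Nat × List (List Int)) (col : Nat) =>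
      (st.1 / grid.length,
        List.foldl (fun g3 row => g3.set row ((g3.getD row []).set col
          ((((List.range grid.length).map (fun i => (List.range kept.length).map
              (fun j => (grid.getD i []).getD (kept.getD j 0) 0))).getD
            ((st.1 % grid.length + row) % grid.length) []).getD col 0)))
          st.2 (List.range grid.length)))
    = (fun (st : Nat × List (List Int)) (col : Nat) =>
        (st.1 / grid.length, colWrite grid.length st.2 col
          (fun row => (((List.range grid.length).map (fun i => (List.range kept.length).map
            (fun j => (grid.getD i []).getD (kept.getD j 0) 0))).getD
            ((st.1 % grid.length + row) % grid.length) []).getD col 0))) := rfl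
  simp only [hcw, pvPairFold, shiftFold_range, buildMat]
  simp only [pvRowSum grid kept k0 kr hn hk]
  rw [← List.foldl_map
    (f := fun mask => Ssum grid.length (accF grid.length
      (kr.map (fun jj => (List.range grid.length).map (fun i => (grid.getD i []).getD jj 0)))
      (mask / grid.length)
      (fun r => rotv grid.length
        ((List.range grid.length).map (fun i => (grid.getD i []).getD k0 0))
        (mask % grid.length) r)))
    (g := aStep)]
  rw [pvFoldl_aStep _ (by
    have hp : 0 < grid.length ^ kept.length := Nat.pow_pos hn
    simp only [ne_eq, List.map_eq_nil_iff, List.range_eq_nil]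
    omega)]
  rw [hk]
  simp only [List.map_cons]
  simp only [bGo_eq_Gm]
  refine pvMaxD_eq ?_ ?_
  · intro x hx
    obtain ⟨mask, hmask, rfl⟩ := List.mem_map.mp hx
    refine le_trans (accF_le_Gm hn _ _ (mask / grid.length)) (pvLe_maxD ?_)
    exact List.mem_map.mpr ⟨mask % grid.length,
      List.mem_range.mpr (Nat.mod_lt _ hn), rfl⟩
  · obtain ⟨mx, hmx⟩ : ∃ mx, ((List.range grid.length).map (fun s =>
        Gm grid.length (kr.map (fun jj => (List.range grid.length).map
          (fun i => (grid.getD i []).getD jj 0)))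
        (fun r => ((List.range grid.length).map
          (fun i => (grid.getD i []).getD k0 0)).getD ((s + r) % grid.length) 0))).max?
        = some mx := by
      cases h : ((List.range grid.length).map (fun s =>
          Gm grid.length (kr.map (fun jj => (List.range grid.length).map
            (fun i => (grid.getD i []).getD jj 0)))
          (fun r => ((List.range grid.length).map
            (fun i => (grid.getD i []).getD k0 0)).getD ((s + r) % grid.length) 0))).max? with
      | none =>
        have := List.max?_eq_none_iff.mp h
        simp only [List.map_eq_nil_iff, List.range_eq_nil] at this
        omega
      | some m => exact ⟨m, rfl⟩
    obtain ⟨s, hs, hsm⟩ := List.mem_map.mp (List.max?_mem hmx)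
    have hs' : s < grid.length := List.mem_range.mp hs
    obtain ⟨mask', hm1, hm2⟩ := accF_ex hn
      (kr.map (fun jj => (List.range grid.length).map (fun i => (grid.getD i []).getD jj 0)))
      (fun r => rotv grid.length
        ((List.range grid.length).map (fun i => (grid.getD i []).getD k0 0)) s r)
    rw [List.length_map] at hm1
    refine List.mem_map.mpr ⟨s + grid.length * mask', List.mem_range.mpr ?_, ?_⟩
    · have h1 : grid.length * mask' + grid.length ≤ grid.length * grid.length ^ kr.length := by
        have h := Nat.mul_le_mul_left grid.length (Nat.succ_le_of_lt hm1)
        rwa [Nat.mul_succ] at h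
      simp only [List.length_cons, Nat.pow_succ']
      omega
    · have hmod : (s + grid.length * mask') % grid.length = s := by
        rw [Nat.add_mul_mod_self_left, Nat.mod_eq_of_lt hs']
      have hdiv : (s + grid.length * mask') / grid.length = mask' := by
        rw [Nat.add_mul_div_left _ _ hn, Nat.div_eq_of_lt hs']
        omega
      simp only [hmod, hdiv]
      rw [hm2, hmx, Option.getD_some]
      exact hsm


-- ===== VERDICT (by name: the statement is the Claim_ definition above) =====
theorem solve_single_case_spec : Claim_equal_solve_single_case := by
  intro grid _ hpre
  unfold Spec_solve_single_case
  rcases hpre with hnil | ⟨hm, _⟩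
  · subst hnil; rfl
  · have hg : grid ≠ [] := by
      intro h; subst h; simp at hm
    exact pvMain grid hg hm
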